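-- pv_equiv track=rewrite | github.com/Prelude-LTDA/blender-addons | shared/node_layout/routing.py | optimize_routing_path
-- ===== SOURCE A (Python) =====
-- def optimize_routing_path(
--     path: list[tuple[int, int]],
--     from_cell: tuple[int, int],
--     to_cell: tuple[int, int],
--     collapse_vertical: bool = True,
--     collapse_horizontal: bool = True,
--     collapse_adjacent: bool = True,
-- ) -> list[tuple[int, int]]:
--     """Optimize routing path by melding unnecessary reroutes.
--
--     Rule 1: Collapse vertical runs - if reroutes are stacked vertically (same X),
--             keep only the last one in the run.
--     Rule 2: Collapse horizontal runs of 3+ - if reroutes are in a horizontal line (same Y),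
--             keep only the first and last, removing internal reroutes.
--     Rule 3: Adjacent column meld - if after optimization only one reroute remains
--             at the destination cell, and the source is in the adjacent column (X-1),
--             we can skip it entirely for a direct node-to-node connection.
--
--     Args:
--         path: List of (x, y) cell coordinates representing the routing path
--         from_cell: Source cell coordinates
--         to_cell: Destination cell coordinates
--         collapse_vertical: Whether to collapse vertical runs (default: True)
--         collapse_horizontal: Whether to collapse horizontal runs of 3+ (default: True)
--         collapse_adjacent: Whether to remove single reroute in adjacent column (default: True)
--
--     Returns:
--         Optimized list of cell coordinates
--     """
--     if not path:
--         return path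
--
--     optimized: list[tuple[int, int]] = []
--     if collapse_vertical:
--         # Rule 1: Collapse vertical runs - keep only the last reroute of each vertical segment
--         i = 0
--         while i < len(path):
--             j = i
--             while j + 1 < len(path) and path[j + 1][0] == path[i][0]:
--                 j += 1
--             optimized.append(path[j])
--             i = j + 1
--     else:
--         optimized = path[:]
--
--     if collapse_horizontal:
--         # Rule 2: Collapse horizontal runs of 3+ reroutes - keep first and last
--         horiz_optimized: list[tuple[int, int]] = []
--         i = 0
--         while i < len(optimized):
--             # Find the end of the current horizontal run (same Y)
--             j = i
--             while j + 1 < len(optimized) and optimized[j + 1][1] == optimized[i][1]: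
--                 j += 1
--             run_length = j - i + 1
--             if run_length >= 3:
--                 # Keep only first and last of this horizontal run
--                 horiz_optimized.append(optimized[i])
--                 horiz_optimized.append(optimized[j])
--             else:
--                 # Keep all (1 or 2 reroutes)
--                 for k in range(i, j + 1):
--                     horiz_optimized.append(optimized[k])
--             i = j + 1
--         optimized = horiz_optimized
--
--     # Rule 3: If after optimization, only one reroute remains at dest cell,
--     # and source is at X-1 (adjacent column), we can remove it entirely
--     if collapse_adjacent and len(optimized) == 1 and from_cell[0] + 1 == to_cell[0]:
--         return []
--
--     return optimized
-- ===== SOURCE B (Python) =====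
-- def optimize_routing_path(
--     path,
--     from_cell,
--     to_cell,
--     collapse_vertical=True,
--     collapse_horizontal=True,
--     collapse_adjacent=True,
-- ):
--     """Single-pass boundary filters instead of nested run-scanning loops."""
--     if not path:
--         return path
--
--     if collapse_vertical:
--         # keep a point iff it is the last of its same-X run
--         optimized = [p for p, q in zip(path, path[1:]) if q[0] != p[0]]
--         optimized.append(path[-1])
--     else:
--         optimized = path[:]
--
--     if collapse_horizontal:
--         # keep a point iff it is the first or the last of its same-Y run
--         kept = []
--         prev_y = None
--         for idx, p in enumerate(optimized):
--             nxt = optimized[idx + 1] if idx + 1 < len(optimized) else None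
--             if prev_y != p[1] or nxt is None or nxt[1] != p[1]:
--                 kept.append(p)
--             prev_y = p[1]
--         optimized = kept
--
--     if collapse_adjacent and len(optimized) == 1 and from_cell[0] + 1 == to_cell[0]:
--         return []
--     return optimized
-- ===== Notes on version B (the rewrite author's own statement) =====
-- stated objective: simpler
-- what changed: Both nested-while run-grouping phases are replaced by flat single-pass boundary filters: keep a point iff it is the last of its same-X run (vertical), and iff it is the first or last of its same-Y run (horizontal), with no inner scan and no index bookkeeping.
import Mathlib
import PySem

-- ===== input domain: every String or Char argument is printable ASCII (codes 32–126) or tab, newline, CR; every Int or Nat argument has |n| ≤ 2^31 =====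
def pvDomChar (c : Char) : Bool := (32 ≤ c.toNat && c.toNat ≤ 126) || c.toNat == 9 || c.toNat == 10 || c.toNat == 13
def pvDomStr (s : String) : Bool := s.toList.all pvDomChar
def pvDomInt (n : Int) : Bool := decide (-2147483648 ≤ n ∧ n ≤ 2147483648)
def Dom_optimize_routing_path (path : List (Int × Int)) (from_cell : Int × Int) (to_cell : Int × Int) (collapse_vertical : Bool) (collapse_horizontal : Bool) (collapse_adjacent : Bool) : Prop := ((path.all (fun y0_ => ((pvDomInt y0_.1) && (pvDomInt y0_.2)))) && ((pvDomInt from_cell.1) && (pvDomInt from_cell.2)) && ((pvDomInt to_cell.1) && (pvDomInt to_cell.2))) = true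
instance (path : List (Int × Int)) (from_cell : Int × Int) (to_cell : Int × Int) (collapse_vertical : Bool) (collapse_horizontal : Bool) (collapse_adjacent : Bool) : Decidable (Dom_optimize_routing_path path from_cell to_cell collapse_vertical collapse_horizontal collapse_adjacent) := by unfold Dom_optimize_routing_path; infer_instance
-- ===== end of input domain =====

-- B replaces A's two nested-while run-grouping passes by single-pass neighbour-boundary filters (objective: simpler).
-- ===== PORT A =====
-- Port of A: index-based outer loops with inner run-scanning while-loops.

-- inner `while j + 1 < len(path) and path[j+1][0] == path[i][0]: j += 1`
def pvScanX (path : List (Int × Int)) (x0 : Int) (j : Nat) : Nat :=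
  if j + 1 < path.length ∧ (path.getD (j + 1) (0, 0)).1 = x0 then pvScanX path x0 (j + 1) else j
termination_by path.length - j

-- inner `while j + 1 < len(optimized) and optimized[j+1][1] == optimized[i][1]: j += 1`
def pvScanY (opt : List (Int × Int)) (y0 : Int) (j : Nat) : Nat :=
  if j + 1 < opt.length ∧ (opt.getD (j + 1) (0, 0)).2 = y0 then pvScanY opt y0 (j + 1) else j
termination_by opt.length - j

theorem pvScanX_ge (path : List (Int × Int)) (x0 : Int) (j : Nat) : j ≤ pvScanX path x0 j := by
  fun_induction pvScanX path x0 j with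
  | case1 j h ih => omega
  | case2 j h => omega

theorem pvScanY_ge (opt : List (Int × Int)) (y0 : Int) (j : Nat) : j ≤ pvScanY opt y0 j := by
  fun_induction pvScanY opt y0 j with
  | case1 j h ih => omega
  | case2 j h => omega

-- Rule 1 outer while-loop of A
def pvVLoopA (path : List (Int × Int)) (i : Nat) (acc : List (Int × Int)) : List (Int × Int) :=
  if h : i < path.length then
    let j := pvScanX path (path.getD i (0, 0)).1 i
    pvVLoopA path (j + 1) (acc ++ [path.getD j (0, 0)])
  else acc
termination_by path.length - i
decreasing_by
  have := pvScanX_ge path (path.getD i (0, 0)).1 i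
  omega

-- Rule 2 outer while-loop of A
def pvHLoopA (opt : List (Int × Int)) (i : Nat) (acc : List (Int × Int)) : List (Int × Int) :=
  if h : i < opt.length then
    let j := pvScanY opt (opt.getD i (0, 0)).2 i
    let acc' := if 3 ≤ j - i + 1 then acc ++ [opt.getD i (0, 0), opt.getD j (0, 0)]
                else acc ++ (List.range' i (j - i + 1)).map (fun k => opt.getD k (0, 0))
    pvHLoopA opt (j + 1) acc'
  else acc
termination_by opt.length - i
decreasing_by
  have := pvScanY_ge opt (opt.getD i (0, 0)).2 i
  omega

def optimize_routing_path (path : List (Int × Int)) (from_cell : Int × Int) (to_cell : Int × Int) (collapse_vertical : Bool) (collapse_horizontal : Bool) (collapse_adjacent : Bool) : List (Int × Int) :=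
  if path = [] then path
  else
    let optimized := if collapse_vertical then pvVLoopA path 0 [] else path
    let optimized := if collapse_horizontal then pvHLoopA optimized 0 [] else optimized
    if collapse_adjacent ∧ optimized.length = 1 ∧ from_cell.1 + 1 = to_cell.1 then []
    else optimized

-- ===== PORT B =====
-- Port of B: single-pass boundary filters over adjacent neighbours.

-- keep a point iff the next point has a different X (the last point is always kept)
def pvVFiltB : List (Int × Int) → List (Int × Int)
  | [] => []
  | [p] => [p]
  | p :: q :: rest => if q.1 ≠ p.1 then p :: pvVFiltB (q :: rest) else pvVFiltB (q :: rest)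

-- keep a point iff its Y differs from the previous point's Y or from the next point's Y
def pvHFiltB (prev : Option Int) : List (Int × Int) → List (Int × Int)
  | [] => []
  | [p] => [p]
  | p :: q :: rest =>
    if prev ≠ some p.2 ∨ q.2 ≠ p.2 then p :: pvHFiltB (some p.2) (q :: rest)
    else pvHFiltB (some p.2) (q :: rest)

def optimize_routing_path_alt (path : List (Int × Int)) (from_cell : Int × Int) (to_cell : Int × Int) (collapse_vertical : Bool) (collapse_horizontal : Bool) (collapse_adjacent : Bool) : List (Int × Int) :=
  if path = [] then path
  else
    let optimized := if collapse_vertical then pvVFiltB path else path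
    let optimized := if collapse_horizontal then pvHFiltB none optimized else optimized
    if collapse_adjacent ∧ optimized.length = 1 ∧ from_cell.1 + 1 = to_cell.1 then []
    else optimized

-- ===== PRECONDITION & SPEC =====
def Spec_optimize_routing_path (path : List (Int × Int)) (from_cell : Int × Int) (to_cell : Int × Int) (collapse_vertical : Bool) (collapse_horizontal : Bool) (collapse_adjacent : Bool) (out : List (Int × Int)) : Prop := out = optimize_routing_path_alt path from_cell to_cell collapse_vertical collapse_horizontal collapse_adjacent
instance (path : List (Int × Int)) (from_cell : Int × Int) (to_cell : Int × Int) (collapse_vertical : Bool) (collapse_horizontal : Bool) (collapse_adjacent : Bool) (out : List (Int × Int)) : Decidable (Spec_optimize_routing_path path from_cell to_cell collapse_vertical collapse_horizontal collapse_adjacent out) := by unfold Spec_optimize_routing_path; infer_instance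

-- ===== CLAIM (what is proved, stated in full; the proofs are below) =====
def Claim_equal_optimize_routing_path : Prop := ∀ (path : List (Int × Int)) (from_cell : Int × Int) (to_cell : Int × Int) (collapse_vertical : Bool) (collapse_horizontal : Bool) (collapse_adjacent : Bool), Dom_optimize_routing_path path from_cell to_cell collapse_vertical collapse_horizontal collapse_adjacent → Spec_optimize_routing_path path from_cell to_cell collapse_vertical collapse_horizontal collapse_adjacent (optimize_routing_path path from_cell to_cell collapse_vertical collapse_horizontal collapse_adjacent)

-- ===== LEMMAS AND PROOFS =====

theorem pvScanY_stop (opt : List (Int × Int)) (y0 : Int) (j : Nat) :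
    pvScanY opt y0 j + 1 < opt.length → (opt.getD (pvScanY opt y0 j + 1) (0, 0)).2 ≠ y0 := by
  fun_induction pvScanY opt y0 j with
  | case1 j h ih => exact ih
  | case2 j h => intro hlt he; exact h ⟨hlt, he⟩

-- drop i decomposes as getD i :: drop (i+1)
theorem pv_drop_cons (l : List (Int × Int)) (i : Nat) (h : i < l.length) :
    l.drop i = l.getD i (0, 0) :: l.drop (i + 1) := by
  rw [List.getD_eq_getElem l (0,0) h, List.drop_eq_getElem_cons h]

-- pvVFiltB on a suffix: the head of the output is the last point of the first same-X run
theorem pvVFiltB_run (path : List (Int × Int)) (i : Nat) (x0 : Int) (h : i < path.length)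
    (hx : (path.getD i (0, 0)).1 = x0) :
    pvVFiltB (path.drop i) =
      path.getD (pvScanX path x0 i) (0, 0) :: pvVFiltB (path.drop (pvScanX path x0 i + 1)) := by
  fun_induction pvScanX path x0 i with
  | case1 i hc ih =>
    rw [pv_drop_cons path i h, pv_drop_cons path (i + 1) hc.1]
    have : ¬ ((path.getD (i + 1) (0, 0)).1 ≠ (path.getD i (0, 0)).1) := by
      rw [hc.2, hx]; simp
    rw [pvVFiltB, if_neg this, ← pv_drop_cons path (i + 1) hc.1]
    exact ih hc.1 hc.2
  | case2 i hc =>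
    rw [pv_drop_cons path i h]
    by_cases h1 : i + 1 < path.length
    · have hne : (path.getD (i + 1) (0, 0)).1 ≠ x0 := by
        intro he; exact hc ⟨h1, he⟩
      rw [pv_drop_cons path (i + 1) h1, pvVFiltB,
          if_pos (by rw [hx]; exact hne),
          ← pv_drop_cons path (i + 1) h1]
    · have : path.drop (i + 1) = [] := List.drop_eq_nil_of_le (by omega)
      rw [this]; rfl

-- A's Rule-1 loop equals B's vertical boundary filter
theorem pvVLoopA_eq (path : List (Int × Int)) (i : Nat) (acc : List (Int × Int)) :
    pvVLoopA path i acc = acc ++ pvVFiltB (path.drop i) := by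
  fun_induction pvVLoopA path i acc with
  | case1 i acc h j ih =>
    rw [ih, List.append_assoc]
    congr 1
    rw [pvVFiltB_run path i (path.getD i (0,0)).1 h rfl]
    rfl
  | case2 i acc h =>
    have : path.drop i = [] := List.drop_eq_nil_of_le (by omega)
    simp [this, pvVFiltB]

-- pvHFiltB inside a same-Y run (prev already equals the run's Y): only the run's last point is kept
theorem pvHFiltB_inrun (opt : List (Int × Int)) (i : Nat) (y0 : Int) (h : i < opt.length)
    (hy : (opt.getD i (0, 0)).2 = y0) :
    pvHFiltB (some y0) (opt.drop i) =
      opt.getD (pvScanY opt y0 i) (0, 0) :: pvHFiltB (some y0) (opt.drop (pvScanY opt y0 i + 1)) := by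
  fun_induction pvScanY opt y0 i with
  | case1 i hc ih =>
    rw [pv_drop_cons opt i h, pv_drop_cons opt (i + 1) hc.1]
    have hcond : ¬ (some y0 ≠ some (opt.getD i (0, 0)).2 ∨
        (opt.getD (i + 1) (0, 0)).2 ≠ (opt.getD i (0, 0)).2) := by
      rw [hy, hc.2]; simp
    rw [pvHFiltB, if_neg hcond, ← pv_drop_cons opt (i + 1) hc.1, hy]
    exact ih hc.1 hc.2
  | case2 i hc =>
    rw [pv_drop_cons opt i h]
    by_cases h1 : i + 1 < opt.length
    · have hne : (opt.getD (i + 1) (0, 0)).2 ≠ y0 := fun he => hc ⟨h1, he⟩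
      rw [pv_drop_cons opt (i + 1) h1, pvHFiltB,
          if_pos (Or.inr (by rw [hy]; exact hne)), hy,
          ← pv_drop_cons opt (i + 1) h1]
    · have : opt.drop (i + 1) = [] := List.drop_eq_nil_of_le (by omega)
      rw [this]; rfl

-- pvHFiltB at a run boundary (prev differs from the run's Y): first and last of the run are kept
theorem pvHFiltB_run (opt : List (Int × Int)) (i : Nat) (y0 : Int) (prev : Option Int)
    (h : i < opt.length) (hy : (opt.getD i (0, 0)).2 = y0) (hprev : prev ≠ some y0) :
    pvHFiltB prev (opt.drop i) =
      (if pvScanY opt y0 i = i then [opt.getD i (0, 0)]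
       else [opt.getD i (0, 0), opt.getD (pvScanY opt y0 i) (0, 0)]) ++
      pvHFiltB (some y0) (opt.drop (pvScanY opt y0 i + 1)) := by
  rw [pvScanY]
  by_cases hc : i + 1 < opt.length ∧ (opt.getD (i + 1) (0, 0)).2 = y0
  · rw [if_pos hc]
    have hscan := pvScanY_ge opt y0 (i + 1)
    rw [if_neg (by omega)]
    rw [pv_drop_cons opt i h, pv_drop_cons opt (i + 1) hc.1, pvHFiltB,
        if_pos (Or.inl (by rw [hy]; exact hprev)), hy,
        ← pv_drop_cons opt (i + 1) hc.1,
        pvHFiltB_inrun opt (i + 1) y0 hc.1 hc.2]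
    rfl
  · rw [if_neg hc, if_pos rfl]
    rw [pv_drop_cons opt i h]
    by_cases h1 : i + 1 < opt.length
    · have hne : (opt.getD (i + 1) (0, 0)).2 ≠ y0 := fun he => hc ⟨h1, he⟩
      rw [pv_drop_cons opt (i + 1) h1, pvHFiltB,
          if_pos (Or.inr (by rw [hy]; exact hne)), hy,
          ← pv_drop_cons opt (i + 1) h1]
      rfl
    · have : opt.drop (i + 1) = [] := List.drop_eq_nil_of_le (by omega)
      rw [this, pvHFiltB]
      rfl

-- A's Rule-2 loop equals B's horizontal boundary filter
theorem pvHLoopA_eq (opt : List (Int × Int)) (i : Nat) (acc : List (Int × Int)) :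
    ∀ (prev : Option Int), (i < opt.length → prev ≠ some (opt.getD i (0, 0)).2) →
    pvHLoopA opt i acc = acc ++ pvHFiltB prev (opt.drop i) := by
  fun_induction pvHLoopA opt i acc with
  | case1 i acc h j acc' ih =>
    intro prev hprev
    have hj : j = pvScanY opt (opt.getD i (0, 0)).2 i := rfl
    have hacc : acc' = if 3 ≤ j - i + 1 then acc ++ [opt.getD i (0, 0), opt.getD j (0, 0)]
        else acc ++ (List.range' i (j - i + 1)).map (fun k => opt.getD k (0, 0)) := rfl
    clear_value acc' j
    subst hj
    have hge := pvScanY_ge opt (opt.getD i (0, 0)).2 i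
    have hnext : pvScanY opt (opt.getD i (0, 0)).2 i + 1 < opt.length →
        some (opt.getD i (0, 0)).2 ≠
          some (opt.getD (pvScanY opt (opt.getD i (0, 0)).2 i + 1) (0, 0)).2 := by
      intro hlt he
      exact pvScanY_stop opt (opt.getD i (0, 0)).2 i hlt (by injection he with h'; exact h'.symm)
    rw [ih _ hnext, pvHFiltB_run opt i (opt.getD i (0, 0)).2 prev h rfl (hprev h),
        ← List.append_assoc]
    congr 1
    rw [hacc]
    by_cases hij : pvScanY opt (opt.getD i (0, 0)).2 i = i
    · rw [if_pos hij, if_neg (by omega), hij]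
      simp [List.range']
    · rw [if_neg hij]
      by_cases h3 : 3 ≤ pvScanY opt (opt.getD i (0, 0)).2 i - i + 1
      · rw [if_pos h3]
      · rw [if_neg h3]
        have h2 : pvScanY opt (opt.getD i (0, 0)).2 i = i + 1 := by omega
        rw [h2]
        have : i + 1 - i + 1 = 2 := by omega
        rw [this]
        simp [List.range']
  | case2 i acc h =>
    intro prev _
    have : opt.drop i = [] := List.drop_eq_nil_of_le (by omega)
    simp [this, pvHFiltB]

-- ===== VERDICT (by name: the statement is the Claim_ definition above) =====
theorem optimize_routing_path_spec : Claim_equal_optimize_routing_path := by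
  intro path from_cell to_cell cv ch ca _
  unfold Spec_optimize_routing_path optimize_routing_path optimize_routing_path_alt
  by_cases hnil : path = []
  · simp [hnil]
  · have hv : (if cv = true then pvVLoopA path 0 [] else path)
        = (if cv = true then pvVFiltB path else path) := by
      rcases cv with _ | _
      · rfl
      · simp [pvVLoopA_eq path 0 []]
    have hh : ∀ o : List (Int × Int), (if ch = true then pvHLoopA o 0 [] else o)
        = (if ch = true then pvHFiltB none o else o) := by
      intro o
      rcases ch with _ | _
      · rfl
      · simp [pvHLoopA_eq o 0 [] none (fun _ => by simp)]
    simp only [if_neg hnil, hv, hh]
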